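-- pv_equiv track=rewrite | github.com/AdityaW2005/LeetCodes | 2624-difference-between-element-sum-and-digit-sum-of-an-array/difference-between-element-sum-and-digit-sum-of-an-array.py | differenceOfSum
-- ===== SOURCE A (Python) =====
-- from typing import List
--
-- def differenceOfSum(nums: List[int]) -> int:
--     element_sum = sum(nums)
--     digit_sum = 0
--     for x in nums:
--         n = x
--         while n > 0:
--             digit_sum += n % 10
--             n //= 10
--     return abs(element_sum - digit_sum)
-- ===== SOURCE B (Python) =====
-- def differenceOfSum(nums):
--     # Uses the identity digitsum(n) = n - 9*sum(n//10**k for k >= 1) (n > 0):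
--     # the answer is abs(sum of non-positives + 9 * total of all repeated tenths).
--     neg = sum(x for x in nums if x <= 0)
--     cur = [x // 10 for x in nums if x > 0]
--     t = 0
--     while cur:
--         t += sum(cur)
--         cur = [x // 10 for x in cur if x > 0]
--     return abs(neg + 9 * t)
-- ===== Notes on version B (the rewrite author's own statement) =====
-- stated objective: alternative
-- what changed: B never extracts digits: it uses the identity digitsum(n) = n - 9*sum(n//10^k, k>=1) and computes the answer columnwise by repeatedly floor-dividing the whole list of positive values by 10 and accumulating the sums, plus the sum of non-positive elements.
import Mathlib
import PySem

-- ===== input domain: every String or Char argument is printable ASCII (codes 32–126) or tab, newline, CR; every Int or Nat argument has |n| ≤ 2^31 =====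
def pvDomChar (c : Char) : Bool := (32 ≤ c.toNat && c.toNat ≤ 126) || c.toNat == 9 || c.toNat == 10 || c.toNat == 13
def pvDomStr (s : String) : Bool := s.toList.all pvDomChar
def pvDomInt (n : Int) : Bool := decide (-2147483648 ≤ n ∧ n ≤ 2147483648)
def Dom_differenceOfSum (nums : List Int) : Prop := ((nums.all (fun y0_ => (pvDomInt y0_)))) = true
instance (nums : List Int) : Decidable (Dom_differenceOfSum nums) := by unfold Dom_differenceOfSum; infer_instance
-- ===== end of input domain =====

-- B is a different algorithm: no digit extraction at all — it uses the identity
-- digitsum(n) = n - 9*Σ_{k≥1} n//10^k and repeatedly floor-divides the list of positives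
-- by 10, accumulating the sums; same asymptotic cost as A.

-- ===== PORT A =====
-- the 'while n > 0: digit_sum += n % 10; n //= 10' loop of A
def pvDigitLoop (n acc : Int) : Int :=
  if 0 < n then pvDigitLoop (PySem.Int.floordiv n 10) (acc + PySem.Int.mod n 10) else acc
termination_by n.toNat
decreasing_by
  rw [PySem.Int.floordiv_eq_ediv_of_pos (by omega)]
  omega

def differenceOfSum (nums : List Int) : Int :=
  let element_sum := nums.sum
  let digit_sum := nums.foldl (fun ds x => pvDigitLoop x ds) 0
  |element_sum - digit_sum|

-- ===== PORT B =====
-- cur = [x // 10 for x in cur if x > 0]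
def pvShrink (cur : List Int) : List Int :=
  (cur.filter (fun x => decide (0 < x))).map (fun x => PySem.Int.floordiv x 10)

-- measure for the while-loop's termination
def pvMeas (cur : List Int) : Nat := (cur.map Int.toNat).sum + cur.length

theorem pvMeas_shrink_le (cur : List Int) : pvMeas (pvShrink cur) ≤ pvMeas cur := by
  induction cur with
  | nil => simp [pvShrink, pvMeas]
  | cons x xs ih =>
    simp only [pvShrink, pvMeas, List.filter_cons] at *
    by_cases h : 0 < x
    · simp only [h, decide_true, if_pos, List.map_cons, List.sum_cons, List.length_cons]
      rw [PySem.Int.floordiv_eq_ediv_of_pos (by omega)]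
      omega
    · simp only [h, decide_false, if_neg, Bool.false_eq_true, not_false_eq_true,
        List.map_cons, List.sum_cons, List.length_cons]
      omega

theorem pvMeas_shrink_lt (x : Int) (xs : List Int) :
    pvMeas (pvShrink (x :: xs)) < pvMeas (x :: xs) := by
  have h := pvMeas_shrink_le xs
  simp only [pvShrink, pvMeas, List.filter_cons] at *
  by_cases hx : 0 < x
  · simp only [hx, decide_true, if_pos, List.map_cons, List.sum_cons, List.length_cons]
    rw [PySem.Int.floordiv_eq_ediv_of_pos (by omega)]
    omega
  · simp only [hx, decide_false, Bool.false_eq_true, if_false, List.map_cons,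
      List.sum_cons, List.length_cons]
    omega

-- 'while cur: t += sum(cur); cur = [x // 10 for x in cur if x > 0]'
def pvLoopB (cur : List Int) (t : Int) : Int :=
  match cur with
  | [] => t
  | x :: xs => pvLoopB (pvShrink (x :: xs)) (t + (x :: xs).sum)
termination_by pvMeas cur
decreasing_by exact pvMeas_shrink_lt x xs

def differenceOfSum_alt (nums : List Int) : Int :=
  let neg := (nums.filter (fun x => decide (x ≤ 0))).sum
  let cur := (nums.filter (fun x => decide (0 < x))).map (fun x => PySem.Int.floordiv x 10)
  |neg + 9 * pvLoopB cur 0|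

-- ===== PRECONDITION & SPEC =====
def Spec_differenceOfSum (nums : List Int) (out : Int) : Prop := out = differenceOfSum_alt nums
instance (nums : List Int) (out : Int) : Decidable (Spec_differenceOfSum nums out) := by unfold Spec_differenceOfSum; infer_instance

-- ===== CLAIM (what is proved, stated in full; the proofs are below) =====
def Claim_equal_differenceOfSum : Prop := ∀ (nums : List Int), Dom_differenceOfSum nums → Spec_differenceOfSum nums (differenceOfSum nums)

-- ===== LEMMAS AND PROOFS =====

-- Σ_{k≥1} x / 10^k, the quantity B's identity is built on
def pvTail (x : Int) : Int :=
  if 0 < x then x / 10 + pvTail (x / 10) else 0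
termination_by x.toNat
decreasing_by omega

theorem pvTail_pos (x : Int) (h : 0 < x) : pvTail x = x / 10 + pvTail (x / 10) := by
  rw [pvTail, if_pos h]

theorem pvTail_nonpos (x : Int) (h : ¬ 0 < x) : pvTail x = 0 := by
  rw [pvTail, if_neg h]

theorem pvDigitLoop_nonpos (x acc : Int) (h : ¬ 0 < x) : pvDigitLoop x acc = acc := by
  rw [pvDigitLoop, if_neg h]

-- A's while-loop in terms of pvTail: digitsum(n) = n - 9 * pvTail n (n ≥ 0)
theorem pvDigitLoop_tail (n acc : Int) (hn : 0 ≤ n) :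
    pvDigitLoop n acc = acc + n - 9 * pvTail n := by
  induction n, acc using pvDigitLoop.induct with
  | case1 n acc h ih =>
    rw [pvDigitLoop, if_pos h]
    rw [PySem.Int.floordiv_eq_ediv_of_pos (by omega), PySem.Int.mod_eq_emod_of_pos (by omega)] at *
    rw [ih (by omega), pvTail_pos n h]
    omega
  | case2 n acc h =>
    have hn0 : n = 0 := by omega
    subst hn0
    rw [pvDigitLoop_nonpos _ _ (by omega), pvTail_nonpos _ (by omega)]
    ring

-- shrink step: Σ_{y ∈ pvShrink cur} (y + pvTail y) = Σ_{x ∈ cur} pvTail x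
theorem shrink_sum (cur : List Int) :
    ((pvShrink cur).map (fun y => y + pvTail y)).sum = (cur.map pvTail).sum := by
  induction cur with
  | nil => simp [pvShrink]
  | cons x xs ih =>
    simp only [pvShrink, List.filter_cons] at *
    by_cases h : 0 < x
    · simp only [h, decide_true, if_pos, List.map_cons, List.sum_cons, ih]
      rw [PySem.Int.floordiv_eq_ediv_of_pos (by omega), pvTail_pos x h]
    · simp only [h, decide_false, Bool.false_eq_true, if_false, ih, List.map_cons,
        List.sum_cons]
      rw [pvTail_nonpos x h]
      omega

-- the while-loop computes Σ (x + pvTail x) on top of t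
theorem pvLoopB_eq (cur : List Int) (t : Int) :
    pvLoopB cur t = t + (cur.map (fun x => x + pvTail x)).sum := by
  induction cur, t using pvLoopB.induct with
  | case1 t => simp [pvLoopB]
  | case2 x xs t ih =>
    rw [pvLoopB, ih, shrink_sum]
    simp only [List.map_cons, List.sum_cons]
    have hsplit : ∀ l : List Int, (l.map fun z => z + pvTail z).sum
        = l.sum + (l.map pvTail).sum := by
      intro l
      induction l with
      | nil => simp
      | cons y ys ihy => simp only [List.map_cons, List.sum_cons, ihy]; ring
    rw [hsplit]
    ring

-- A's foldl as a sum of per-element digit sums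
theorem foldl_digitLoop (nums : List Int) (d0 : Int) :
    nums.foldl (fun ds x => pvDigitLoop x ds) d0
      = d0 + (nums.map (fun x => pvDigitLoop x 0)).sum := by
  induction nums generalizing d0 with
  | nil => simp
  | cons x xs ih =>
    simp only [List.foldl_cons, List.map_cons, List.sum_cons, ih]
    have hx : pvDigitLoop x d0 = pvDigitLoop x 0 + d0 := by
      by_cases h : 0 < x
      · rw [pvDigitLoop_tail x d0 (le_of_lt h), pvDigitLoop_tail x 0 (le_of_lt h)]; ring
      · rw [pvDigitLoop_nonpos _ _ h, pvDigitLoop_nonpos _ _ h]; ring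
    rw [hx]; ring

-- the central sum identity
theorem key_sum (nums : List Int) :
    nums.sum - (nums.map (fun x => pvDigitLoop x 0)).sum
      = (nums.filter (fun x => decide (x ≤ 0))).sum + 9 * (nums.map pvTail).sum := by
  induction nums with
  | nil => simp
  | cons x xs ih =>
    simp only [List.sum_cons, List.map_cons, List.filter_cons]
    by_cases h : 0 < x
    · have hd : pvDigitLoop x 0 = x - 9 * pvTail x := by
        rw [pvDigitLoop_tail x 0 (le_of_lt h)]; ring
      have hle : ¬ (x ≤ 0) := by omega
      simp only [hle, decide_false, Bool.false_eq_true, if_false, hd]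
      omega
    · have hd : pvDigitLoop x 0 = 0 := pvDigitLoop_nonpos x 0 h
      have ht : pvTail x = 0 := pvTail_nonpos x h
      have hle : x ≤ 0 := by omega
      simp only [hle, decide_true, if_pos, List.sum_cons, hd, ht]
      omega

-- ===== VERDICT (by name: the statement is the Claim_ definition above) =====
theorem differenceOfSum_spec : Claim_equal_differenceOfSum := by
  intro nums _
  simp only [Spec_differenceOfSum, differenceOfSum, differenceOfSum_alt]
  rw [foldl_digitLoop, pvLoopB_eq]
  have hcur : (nums.filter (fun x => decide (0 < x))).map (fun x => PySem.Int.floordiv x 10)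
      = pvShrink nums := rfl
  rw [hcur]
  have := shrink_sum nums
  rw [this]
  simp only [zero_add]
  rw [key_sum nums]
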